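-- pv_equiv track=rewrite | github.com/gifted-professor/global-creator-screening | scripts/run_keep_list_screening_pipeline.py | normalize_platforms
-- ===== SOURCE A (Python) =====
-- DEFAULT_PLATFORM_ORDER = ("tiktok", "instagram", "youtube")
--
-- def normalize_platforms(values: list[str] | None) -> list[str]:
--     if not values:
--         return list(DEFAULT_PLATFORM_ORDER)
--     supported_platforms = set(DEFAULT_PLATFORM_ORDER)
--     normalized: list[str] = []
--     seen: set[str] = set()
--     for value in values:
--         platform = str(value or "").strip().lower()
--         if platform not in supported_platforms:
--             raise ValueError(f"不支持的平台: {value}")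
--         if platform in seen:
--             continue
--         seen.add(platform)
--         normalized.append(platform)
--     return normalized
-- ===== SOURCE B (Python) =====
-- DEFAULT_PLATFORM_ORDER = ("tiktok", "instagram", "youtube")
--
-- def normalize_platforms(values):
--     if not values:
--         return list(DEFAULT_PLATFORM_ORDER)
--     # pass 1: clean every entry
--     cleaned = [str(v or "").strip().lower() for v in values]
--     # pass 2: validate in order, reporting the first offending raw value
--     for original, platform in zip(values, cleaned):
--         if platform not in DEFAULT_PLATFORM_ORDER:
--             raise ValueError(f"不支持的平台: {original}")
--     # pass 3: build the output from the SUPPORTED constants: each supported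
--     # platform that occurs is tagged with its first-occurrence index, and the
--     # result is those platforms sorted by that index (= first-seen order).
--     firsts = [(cleaned.index(p), p) for p in DEFAULT_PLATFORM_ORDER if p in cleaned]
--     firsts.sort(key=lambda t: t[0])
--     return [p for _, p in firsts]
-- ===== Notes on version B (the rewrite author's own statement) =====
-- stated objective: alternative
-- what changed: Instead of A's single interleaved scan threading a seen-set and an output list, B cleans all entries, validates them in order, then builds the output by iterating over the three SUPPORTED constants, pairing each occurring platform with its first-occurrence index in the cleaned list and sorting by that index (no seen-set, no dedup over the input).
import Mathlib
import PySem

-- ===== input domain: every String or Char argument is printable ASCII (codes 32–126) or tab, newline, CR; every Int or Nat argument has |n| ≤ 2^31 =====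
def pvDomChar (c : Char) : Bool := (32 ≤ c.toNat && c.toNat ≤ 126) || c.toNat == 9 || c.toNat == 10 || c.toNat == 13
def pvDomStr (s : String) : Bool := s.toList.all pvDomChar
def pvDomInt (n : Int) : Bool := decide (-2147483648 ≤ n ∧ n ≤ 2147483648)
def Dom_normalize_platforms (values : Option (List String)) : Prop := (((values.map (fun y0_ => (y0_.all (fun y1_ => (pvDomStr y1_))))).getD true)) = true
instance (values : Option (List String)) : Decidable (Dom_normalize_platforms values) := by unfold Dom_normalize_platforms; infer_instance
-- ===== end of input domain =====

-- B replaces A's single interleaved loop (seen-set + output threaded together) by staged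
-- passes whose output is built from the SUPPORTED constants sorted by first-occurrence index.


-- ===== PORT A =====
def pvDefaultPlatformOrder : List String := ["tiktok", "instagram", "youtube"]

-- platform = str(value or "").strip().lower()
def pvClean (value : String) : String :=
  PySem.Str.lower (PySem.Str.strip (if value = "" then "" else value))

-- A's single loop: threads the output list and the 'seen' set together.
-- On an unsupported platform Python raises ValueError; Pre_ excludes those inputs,
-- and the port returns [] there.
def normAGo (vs : List String) (normalized : List String) (seen : PySem.Set String) : List String :=
  match vs with
  | [] => normalized
  | value :: rest =>
    let platform := pvClean value
    if (PySem.Set.ofList pvDefaultPlatformOrder).contains platform then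
      if seen.contains platform then normAGo rest normalized seen
      else normAGo rest (normalized ++ [platform]) (seen.add platform)
    else []  -- raise ValueError (excluded by Pre_)

def normalize_platforms (values : Option (List String)) : List String :=
  match values with
  | none => pvDefaultPlatformOrder
  | some vs =>
    if vs = [] then pvDefaultPlatformOrder
    else normAGo vs [] PySem.Set.empty

-- ===== PORT B =====
-- cleaned.index(p) (always present where B computes it; getD 0 is never taken)
def pvIdx (xs : List String) (v : String) : Nat := (PySem.List.index? xs v).getD 0

def normalize_platforms_alt (values : Option (List String)) : List String :=
  match values with
  | none => pvDefaultPlatformOrder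
  | some vs =>
    if vs = [] then pvDefaultPlatformOrder
    else
      -- pass 1: clean every entry
      let cleaned := vs.map pvClean
      -- pass 2: validate (Python raises on the first unsupported entry; excluded by Pre_)
      if cleaned.all (fun p => pvDefaultPlatformOrder.contains p) then
        -- pass 3: [(cleaned.index(p), p) for p in DEFAULT_PLATFORM_ORDER if p in cleaned]
        let firsts := (pvDefaultPlatformOrder.filter (fun p => cleaned.contains p)).map
          (fun p => (pvIdx cleaned p, p))
        -- firsts.sort(key=lambda t: t[0]); return [p for _, p in firsts]
        (PySem.List.sorted firsts (fun t => t.1) false).map (fun t => t.2)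
      else []  -- raise ValueError (excluded by Pre_)

-- ===== PRECONDITION & SPEC =====
-- Pre_ excludes exactly the inputs on which A raises ValueError: a list containing an
-- entry whose cleaned form is not one of the supported platforms.
def Pre_normalize_platforms (values : Option (List String)) : Prop :=
  ∀ v ∈ values.getD [], PySem.Str.lower (PySem.Str.strip v) ∈ ["tiktok", "instagram", "youtube"]
instance (values : Option (List String)) : Decidable (Pre_normalize_platforms values) := by
  unfold Pre_normalize_platforms; infer_instance

def pvWitness_normalize_platforms : Option (List String) := some ["TikTok ", " youtube", "tiktok"]

def Spec_normalize_platforms (values : Option (List String)) (out : List String) : Prop := out = normalize_platforms_alt values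
instance (values : Option (List String)) (out : List String) : Decidable (Spec_normalize_platforms values out) := by unfold Spec_normalize_platforms; infer_instance

-- ===== CLAIM (what is proved, stated in full; the proofs are below) =====
def Claim_equal_normalize_platforms : Prop := ∀ (values : Option (List String)), Dom_normalize_platforms values → Pre_normalize_platforms values → Spec_normalize_platforms values (normalize_platforms values)

-- ===== LEMMAS AND PROOFS =====

lemma contains_default_of_mem (p : String) (h : p ∈ pvDefaultPlatformOrder) :
    (PySem.Set.ofList pvDefaultPlatformOrder).contains p = true := by
  have : PySem.Set.ofList pvDefaultPlatformOrder = pvDefaultPlatformOrder := by decide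
  rw [this]
  exact List.elem_eq_true_of_mem h

lemma pvClean_eq (v : String) : pvClean v = PySem.Str.lower (PySem.Str.strip v) := by
  unfold pvClean
  split <;> simp_all

-- A's loop, started with output list = seen set, is the Set.add fold, i.e. Set.ofList.
lemma normAGo_eq_ofList (vs : List String) (s : List String)
    (h : ∀ v ∈ vs, pvClean v ∈ pvDefaultPlatformOrder) :
    normAGo vs s s = List.foldl PySem.Set.add s (vs.map pvClean) := by
  induction vs generalizing s with
  | nil => simp [normAGo]
  | cons v rest ih =>
    have hv : pvClean v ∈ pvDefaultPlatformOrder := h v (List.mem_cons_self ..)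
    have hrest : ∀ x ∈ rest, pvClean x ∈ pvDefaultPlatformOrder :=
      fun x hx => h x (List.mem_cons_of_mem _ hx)
    rw [show normAGo (v :: rest) s s =
        (if (PySem.Set.ofList pvDefaultPlatformOrder).contains (pvClean v) then
          if PySem.Set.contains s (pvClean v) then normAGo rest s s
          else normAGo rest (s ++ [pvClean v]) (PySem.Set.add s (pvClean v))
        else []) from rfl]
    rw [contains_default_of_mem _ hv, if_pos rfl, List.map_cons, List.foldl_cons]
    cases hc : PySem.Set.contains s (pvClean v) with
    | true =>
      rw [if_pos rfl, ih s hrest]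
      have : PySem.Set.add s (pvClean v) = s := by
        simp only [PySem.Set.add, hc, if_true]
      rw [this]
    | false =>
      have hadd : PySem.Set.add s (pvClean v) = s ++ [pvClean v] := by
        simp only [PySem.Set.add, hc, Bool.false_eq_true, if_false]
      rw [if_neg (by simp), hadd, ih (s ++ [pvClean v]) hrest]

lemma pvIdx_append_of_mem (l t : List String) (v : String) (hv : v ∈ l) :
    pvIdx (l ++ t) v = pvIdx l v := by
  unfold pvIdx
  rw [PySem.List.index?_append_of_mem t hv]

-- the members of Set.ofList xs appear in order of strictly increasing first index in xs
lemma pairwise_idx_ofList (xs : List String) :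
    (PySem.Set.ofList xs).Pairwise (fun a b => pvIdx xs a < pvIdx xs b) := by
  induction xs using List.reverseRecOn with
  | nil => simp [PySem.Set.ofList]
  | append_singleton l x ih =>
    have hofl : PySem.Set.ofList (l ++ [x]) = PySem.Set.add (PySem.Set.ofList l) x := by
      rw [PySem.Set.ofList_eq_foldl, PySem.Set.ofList_eq_foldl, List.foldl_append]
      rfl
    have hmem : ∀ a ∈ PySem.Set.ofList l, a ∈ l :=
      fun a ha => (PySem.Set.mem_ofList l a).mp ha
    by_cases hx : PySem.Set.contains (PySem.Set.ofList l) x = true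
    · have : PySem.Set.add (PySem.Set.ofList l) x = PySem.Set.ofList l := by
        simp only [PySem.Set.add, hx, if_true]
      rw [hofl, this]
      refine (List.Pairwise.imp_of_mem ?_ ih)
      intro a b ha hb hab
      rwa [pvIdx_append_of_mem l [x] a (hmem a ha), pvIdx_append_of_mem l [x] b (hmem b hb)]
    · have hxl : x ∉ l := fun hmemx =>
        hx (List.elem_eq_true_of_mem ((PySem.Set.mem_ofList l x).mpr hmemx))
      have : PySem.Set.add (PySem.Set.ofList l) x = PySem.Set.ofList l ++ [x] := by
        simp only [PySem.Set.add, hx, Bool.false_eq_true, if_false]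
      rw [hofl, this]
      rw [List.pairwise_append]
      refine ⟨(List.Pairwise.imp_of_mem ?_ ih), List.pairwise_singleton _ _, ?_⟩
      · intro a b ha hb hab
        rwa [pvIdx_append_of_mem l [x] a (hmem a ha), pvIdx_append_of_mem l [x] b (hmem b hb)]
      · intro a ha b hb
        rw [List.mem_singleton] at hb
        rw [hb]
        have hal : a ∈ l := hmem a ha
        rw [pvIdx_append_of_mem l [x] a hal]
        have hidxx : PySem.List.index? (l ++ [x]) x = some l.length :=
          PySem.List.index?_append_singleton_self l x hxl
        have hidxa : ∃ k, PySem.List.index? l a = some k ∧ k < l.length := by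
          obtain ⟨k, hk⟩ := Option.isSome_iff_exists.mp ((PySem.List.index?_isSome_iff l a).mpr hal)
          obtain ⟨hk', _, _⟩ := PySem.List.getElem_of_index?_eq_some hk
          exact ⟨k, hk, hk'⟩
        obtain ⟨k, hk, hklt⟩ := hidxa
        unfold pvIdx
        rw [hk, hidxx]
        simpa using hklt

-- B's sorted pair list is exactly Set.ofList cleaned tagged with indices
lemma b_core_eq (cleaned : List String)
    (h : ∀ p ∈ cleaned, p ∈ pvDefaultPlatformOrder) :
    (PySem.List.sorted
        ((pvDefaultPlatformOrder.filter (fun p => cleaned.contains p)).map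
          (fun p => (pvIdx cleaned p, p)))
        (fun t => t.1) false).map (fun t => t.2)
      = PySem.Set.ofList cleaned := by
  set f : String → Nat × String := fun p => (pvIdx cleaned p, p) with hf
  have hperm : ((PySem.Set.ofList cleaned).map f).Perm
      ((pvDefaultPlatformOrder.filter (fun p => cleaned.contains p)).map f) := by
    refine List.Perm.map f ?_
    refine (List.perm_ext_iff_of_nodup ?_ ?_).mpr ?_
    · exact PySem.Set.nodup_ofList cleaned
    · exact List.Nodup.filter _ (by decide)
    · intro a
      rw [PySem.Set.mem_ofList, List.mem_filter]
      constructor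
      · intro ha
        exact ⟨h a ha, List.elem_eq_true_of_mem ha⟩
      · rintro ⟨_, hc⟩
        exact List.mem_of_elem_eq_true hc
  have hpair : ((PySem.Set.ofList cleaned).map f).Pairwise
      (fun a b => (fun t : Nat × String => t.1) a < (fun t : Nat × String => t.1) b) := by
    rw [List.pairwise_map]
    exact pairwise_idx_ofList cleaned
  rw [PySem.List.sorted_eq_of_perm_of_pairwise_lt _ _ _ hperm hpair, List.map_map]
  have : ((fun t : Nat × String => t.2) ∘ f) = id := by
    funext p; rfl
  rw [this, List.map_id]

-- ===== VERDICT (by name: the statement is the Claim_ definition above) =====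
theorem normalize_platforms_spec : Claim_equal_normalize_platforms := by
  intro values _ hpre
  unfold Spec_normalize_platforms normalize_platforms normalize_platforms_alt
  match values with
  | none => rfl
  | some vs =>
    simp only
    by_cases hvs : vs = []
    · simp [hvs]
    · have hall : ∀ v ∈ vs, pvClean v ∈ pvDefaultPlatformOrder := by
        intro v hv
        have := hpre v (by simpa using hv)
        simpa [pvClean_eq, pvDefaultPlatformOrder] using this
      have hallc : ∀ p ∈ vs.map pvClean, p ∈ pvDefaultPlatformOrder := by
        intro p hp
        obtain ⟨v, hv, rfl⟩ := List.mem_map.mp hp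
        exact hall v hv
      have hallb : (vs.map pvClean).all (fun p => pvDefaultPlatformOrder.contains p) = true := by
        simp only [List.all_eq_true]
        intro p hp
        exact List.elem_eq_true_of_mem (hallc p hp)
      simp only [hvs, hallb, if_true]
      rw [if_neg not_false, if_neg not_false]
      rw [show (PySem.Set.empty : PySem.Set String) = ([] : List String) from rfl,
        normAGo_eq_ofList vs [] hall, ← PySem.Set.ofList_eq_foldl,
        b_core_eq (vs.map pvClean) hallc]
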